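-- pv_equiv track=rewrite | github.com/yogaV28/CCCtraining_2023_12 | T 110 Binary Flips.py | longest_onely_sequence
-- ===== SOURCE A (Python) =====
-- def longest_onely_sequence(n, m, arr):
--     left = 0
--     right = 0
--     max_len = 0
--     max_left = 0
--     zero_count = 0
--
--     while right < n:
--         if arr[right] == 0:
--             zero_count += 1
--
--         while zero_count > m:
--             if arr[left] == 0:
--                 zero_count -= 1
--             left += 1
--
--         if right - left + 1 > max_len:
--             max_len = right - left + 1
--             max_left = left
--
--         right += 1
--
--     return max_left + 1, max_left + max_len
-- ===== SOURCE B (Python) =====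
-- def longest_onely_sequence(n, m, arr):
--     # positions of zeros in the scanned prefix arr[0:n]
--     zeros = [i for i in range(n) if arr[i] == 0]
--     if len(zeros) <= m:
--         # everything can be flipped: the whole scanned prefix is the answer
--         return 1, max(n, 0)
--     p = [-1] + zeros + [n]
--     best_len = 0
--     best_left = 0
--     for i in range(len(zeros) - m + 1):
--         length = p[i + m + 1] - p[i] - 1
--         if length > best_len:
--             best_len = length
--             best_left = p[i] + 1
--     return best_left + 1, best_left + best_len
-- ===== Notes on version B (the rewrite author's own statement) =====
-- stated objective: alternative
-- what changed: Replaces the two-pointer sliding window over the array by one comprehension collecting zero positions plus a gap scan over windows of m consecutive zeros (padded with sentinels, leftmost maximal gap wins), instead of maintaining left/zero_count per element.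
-- outside the precondition, e.g. on longest_onely_sequence(-1, -2, []): A returns (1, 0), B raises IndexError; on longest_onely_sequence(0, -1, []): A returns (1, 0), B returns (1, 0)
import Mathlib
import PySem

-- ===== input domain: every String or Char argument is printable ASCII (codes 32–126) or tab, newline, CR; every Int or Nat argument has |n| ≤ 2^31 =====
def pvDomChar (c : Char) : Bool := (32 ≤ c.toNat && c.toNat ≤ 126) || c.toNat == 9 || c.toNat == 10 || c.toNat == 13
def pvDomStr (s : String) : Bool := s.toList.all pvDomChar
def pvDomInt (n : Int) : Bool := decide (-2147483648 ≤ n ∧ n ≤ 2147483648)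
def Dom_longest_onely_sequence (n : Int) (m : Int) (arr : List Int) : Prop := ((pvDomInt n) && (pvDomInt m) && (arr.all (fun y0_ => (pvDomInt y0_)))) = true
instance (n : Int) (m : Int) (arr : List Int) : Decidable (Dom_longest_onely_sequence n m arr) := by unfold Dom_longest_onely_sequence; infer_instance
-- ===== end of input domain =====

-- B replaces A's two-pointer sliding window by a single scan collecting zero positions and a
-- gap scan over windows of m consecutive zeros (equivalence is about the return value only).

-- ===== PORT A =====
-- inner `while zero_count > m` loop of A (fuel bounds the number of `left += 1` steps;
-- `none` from pyGet? is Python's IndexError, excluded by Pre_)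
def pvAInner (arr : List Int) (m : Int) : Nat → Int → Int → Int × Int
  | 0, left, zc => (left, zc)
  | fuel+1, left, zc =>
    if m < zc then
      match PySem.List.pyGet? arr left with
      | none => (left, zc)
      | some v => pvAInner arr m fuel (left + 1) (if v = 0 then zc - 1 else zc)
    else (left, zc)

-- outer `while right < n` loop of A
def pvAOuter (arr : List Int) (n m : Int) : Nat → Int → Int → Int → Int → Int → Int × Int
  | 0, _, _, _, maxLen, maxLeft => (maxLeft + 1, maxLeft + maxLen)
  | fuel+1, right, left, zc, maxLen, maxLeft =>
    if right < n then
      match PySem.List.pyGet? arr right with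
      | none => (maxLeft + 1, maxLeft + maxLen)
      | some v =>
        let zc1 := if v = 0 then zc + 1 else zc
        let s := pvAInner arr m (arr.length + 1) left zc1
        let best := if maxLen < right - s.1 + 1 then (right - s.1 + 1, s.1) else (maxLen, maxLeft)
        pvAOuter arr n m fuel (right + 1) s.1 s.2 best.1 best.2
    else (maxLeft + 1, maxLeft + maxLen)

def longest_onely_sequence (n : Int) (m : Int) (arr : List Int) : Int × Int :=
  pvAOuter arr n m n.toNat 0 0 0 0 0

-- ===== PORT B =====
-- zeros = [i for i in range(r) if arr[i] == 0]
def pvZeros (arr : List Int) (r : Int) : List Int :=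
  (PySem.List.pyRange 0 r 1).filter (fun i => PySem.List.pyGet? arr i == some 0)

def longest_onely_sequence_alt (n : Int) (m : Int) (arr : List Int) : Int × Int :=
  let zeros := pvZeros arr n
  if (zeros.length : Int) ≤ m then (1, max n 0)
  else
    let p : List Int := -1 :: zeros ++ [n]
    let best := (PySem.List.pyRange 0 ((zeros.length : Int) - m + 1) 1).foldl
      (fun best i =>
        let len := PySem.List.pyGetD p (i + m + 1) 0 - PySem.List.pyGetD p i 0 - 1
        if best.1 < len then (len, PySem.List.pyGetD p i 0 + 1) else best)
      ((0, 0) : Int × Int)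
    (best.2 + 1, best.2 + best.1)

-- ===== PRECONDITION & SPEC =====
-- Pre_ excludes negative m (A's inner loop then runs off the end of the array — IndexError —
-- whenever n > 0; A returns only in the degenerate case n ≤ 0, where B agrees on m = -1 but
-- can index out of range for smaller m) and n > len(arr) (IndexError in A's arr[right]).
def Pre_longest_onely_sequence (n : Int) (m : Int) (arr : List Int) : Prop :=
  0 ≤ m ∧ n ≤ (arr.length : Int)
instance (n : Int) (m : Int) (arr : List Int) : Decidable (Pre_longest_onely_sequence n m arr) := by
  unfold Pre_longest_onely_sequence; infer_instance

def pvWitness_longest_onely_sequence : Int × Int × List Int := (4, 1, [1, 0, 0, 1])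

def Spec_longest_onely_sequence (n : Int) (m : Int) (arr : List Int) (out : Int × Int) : Prop := out = longest_onely_sequence_alt n m arr
instance (n : Int) (m : Int) (arr : List Int) (out : Int × Int) : Decidable (Spec_longest_onely_sequence n m arr out) := by unfold Spec_longest_onely_sequence; infer_instance

-- ===== CLAIM (what is proved, stated in full; the proofs are below) =====
def Claim_equal_longest_onely_sequence : Prop := ∀ (n : Int) (m : Int) (arr : List Int), Dom_longest_onely_sequence n m arr → Pre_longest_onely_sequence n m arr → Spec_longest_onely_sequence n m arr (longest_onely_sequence n m arr)

-- ===== LEMMAS AND PROOFS =====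

-- proof-side view: the "leftmost maximal window" fold and B's slot list, reshaped for induction

-- the strict-improvement update A and B both perform on (best_len, best_left)
def pvStep (best x : Int × Int) : Int × Int := if best.1 < x.1 then x else best

def pvBfold (l : List (Int × Int)) : Int × Int := l.foldl pvStep (0, 0)

def pvQ (Z : List Int) : List Int := -1 :: Z

-- B's slot list (window length, window start) for zero-position list Z and right sentinel r
def pvSlots (Z : List Int) (m r : Int) : List (Int × Int) :=
  (List.range (Z.length - m.toNat + 1)).map (fun i =>
    ((pvQ Z ++ [r]).getD (i + m.toNat + 1) 0 - (pvQ Z ++ [r]).getD i 0 - 1,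
     (pvQ Z ++ [r]).getD i 0 + 1))

-- all slots except the last one (they do not depend on the sentinel)
def pvInit (Z : List Int) (m : Int) : List (Int × Int) :=
  (List.range (Z.length - m.toNat)).map (fun i =>
    ((pvQ Z).getD (i + m.toNat + 1) 0 - (pvQ Z).getD i 0 - 1, (pvQ Z).getD i 0 + 1))

-- A's `left` pointer, expressed from the zero positions
def pvLof (Z : List Int) (m : Int) : Int := (pvQ Z).getD (Z.length - m.toNat) 0 + 1

-- loop invariant of A's outer loop after processing the prefix of length r
def pvInv (arr : List Int) (m r left zc ml mL : Int) : Prop :=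
  left = pvLof (pvZeros arr r) m ∧
  zc = min ((pvZeros arr r).length : Int) m ∧
  ((((pvZeros arr r).length : Int) ≤ m ∧ ml = r ∧ mL = 0) ∨
   (m < ((pvZeros arr r).length : Int) ∧ (ml, mL) = pvBfold (pvSlots (pvZeros arr r) m r)))

theorem pvZeros_nonpos (arr : List Int) (r : Int) (h : r ≤ 0) : pvZeros arr r = [] := by
  simp [pvZeros, PySem.List.pyRange_one_eq_nil h]

theorem pvZeros_succ (arr : List Int) (r : Int) (h : 0 ≤ r) :
    pvZeros arr (r + 1) =
      pvZeros arr r ++ (if PySem.List.pyGet? arr r = some 0 then [r] else []) := by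
  unfold pvZeros
  rw [PySem.List.pyRange_one_succ_right h, List.filter_append]
  congr 1
  by_cases hp : PySem.List.pyGet? arr r = some 0 <;> simp [hp]

theorem mem_pvZeros (arr : List Int) (r s : Int) :
    s ∈ pvZeros arr r ↔ (0 ≤ s ∧ s < r ∧ PySem.List.pyGet? arr s = some 0) := by
  simp [pvZeros, List.mem_filter, PySem.List.mem_pyRange_one, and_assoc]

theorem pvZeros_pairwise (arr : List Int) (r : Int) : (pvZeros arr r).Pairwise (· < ·) := by
  exact List.Pairwise.filter _ (PySem.List.pairwise_lt_pyRange_one 0 r)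

theorem pvBfold_append (l : List (Int × Int)) (x : Int × Int) :
    pvBfold (l ++ [x]) = pvStep (pvBfold l) x := by
  simp [pvBfold, List.foldl_append]

theorem pvStep_bump (acc : Int × Int) (x s : Int) :
    pvStep (pvStep acc (x, s)) (x + 1, s) = pvStep acc (x + 1, s) := by
  unfold pvStep
  by_cases h1 : acc.1 < x <;> simp [h1] <;> intro h2 <;> omega

theorem ite_pvStep (ml mL x s : Int) :
    (if ml < x then (x, s) else (ml, mL)) = pvStep (ml, mL) (x, s) := rfl

theorem getD_q_append (Z : List Int) (w : Int) (j : Nat) (h : j ≤ Z.length) :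
    (pvQ Z ++ [w]).getD j 0 = (pvQ Z).getD j 0 := by
  apply List.getD_append
  simp [pvQ]; omega

theorem getD_q_last (Z : List Int) (w : Int) :
    (pvQ Z ++ [w]).getD (Z.length + 1) 0 = w := by
  rw [List.getD_append_right]
  · simp [pvQ]
  · simp [pvQ]

theorem pvLof_zero (Z : List Int) (m : Int) (h : (Z.length : Int) ≤ m) : pvLof Z m = 0 := by
  unfold pvLof
  have h0 : Z.length - m.toNat = 0 := by omega
  rw [h0]
  simp [pvQ]

theorem pvLof_nonneg (Z : List Int) (m : Int) (hZ : ∀ z ∈ Z, 0 ≤ z) : 0 ≤ pvLof Z m := by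
  unfold pvLof
  have hj : Z.length - m.toNat < (pvQ Z).length := by simp [pvQ]
  rw [List.getD_eq_getElem _ _ hj]
  have hmem := List.getElem_mem hj
  rcases List.mem_cons.mp hmem with h | h
  · omega
  · have := hZ _ h; omega

theorem pvSlots_decomp (Z : List Int) (m r : Int) (hm : 0 ≤ m) (hkm : m < (Z.length : Int)) :
    pvSlots Z m r = pvInit Z m ++ [(r - pvLof Z m, pvLof Z m)] := by
  have hMk : m.toNat < Z.length := by omega
  unfold pvSlots pvInit
  rw [List.range_succ, List.map_append]
  congr 1
  · apply List.map_congr_left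
    intro i hi
    rw [List.mem_range] at hi
    rw [getD_q_append _ _ _ (by omega), getD_q_append _ _ _ (by omega)]
  · simp only [List.map_cons, List.map_nil]
    have h1 : Z.length - m.toNat + m.toNat + 1 = Z.length + 1 := by omega
    rw [h1, getD_q_last, getD_q_append _ _ _ (by omega)]
    unfold pvLof
    have : r - (pvQ Z).getD (Z.length - m.toNat) 0 - 1 = r - ((pvQ Z).getD (Z.length - m.toNat) 0 + 1) := by ring
    rw [this]

theorem pvSlots_snoc (Z : List Int) (m w s : Int) (hm : 0 ≤ m) (hkM : m ≤ (Z.length : Int)) :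
    pvSlots (Z ++ [w]) m s =
      pvSlots Z m w ++ [(s - pvLof (Z ++ [w]) m, pvLof (Z ++ [w]) m)] := by
  have hMk : m.toNat ≤ Z.length := by omega
  have hlen : (Z ++ [w]).length = Z.length + 1 := by simp
  have hq : pvQ (Z ++ [w]) ++ [s] = pvQ Z ++ [w, s] := by simp [pvQ]
  have hcnt : (Z ++ [w]).length - m.toNat + 1 = (Z.length - m.toNat + 1) + 1 := by
    rw [hlen]; omega
  unfold pvSlots
  rw [hcnt, List.range_succ, List.map_append]
  congr 1
  · apply List.map_congr_left
    intro i hi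
    rw [List.mem_range] at hi
    have e : ∀ (j : Nat), j ≤ Z.length + 1 → (pvQ (Z ++ [w]) ++ [s]).getD j 0 = (pvQ Z ++ [w]).getD j 0 := by
      intro j hj
      rw [hq]
      rcases Nat.lt_or_ge j (Z.length + 1) with hj2 | hj2
      · rw [List.getD_append _ _ _ _ (by simp [pvQ]; omega),
            List.getD_append _ _ _ _ (by simp [pvQ]; omega)]
      · have hj3 : j = Z.length + 1 := by omega
        subst hj3
        rw [List.getD_append_right _ _ _ _ (by simp [pvQ]),
            List.getD_append_right _ _ _ _ (by simp [pvQ])]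
        simp [pvQ]
    rw [e _ (by omega), e _ (by omega)]
  · simp only [List.map_cons, List.map_nil]
    have h1 : Z.length - m.toNat + 1 + m.toNat + 1 = Z.length + 2 := by omega
    have hlast : (pvQ (Z ++ [w]) ++ [s]).getD (Z.length + 2) 0 = s := by
      rw [List.getD_append_right _ _ _ _ (by simp [pvQ])]
      simp [pvQ]
    have hmid : (pvQ (Z ++ [w]) ++ [s]).getD (Z.length - m.toNat + 1) 0 = pvLof (Z ++ [w]) m - 1 := by
      rw [List.getD_append _ _ _ _ (by simp [pvQ])]
      unfold pvLof
      rw [hlen]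
      have : Z.length + 1 - m.toNat = Z.length - m.toNat + 1 := by omega
      rw [this]; ring
    rw [h1, hlast, hmid]
    have h2 : s - (pvLof (Z ++ [w]) m - 1) - 1 = s - pvLof (Z ++ [w]) m := by ring
    rw [h2]
    have h3 : pvLof (Z ++ [w]) m - 1 + 1 = pvLof (Z ++ [w]) m := by ring
    rw [h3]

theorem pvSlots_single (Z : List Int) (m r : Int) (hm : 0 ≤ m) (hk : (Z.length : Int) = m)
    (hr : 0 ≤ r) : pvBfold (pvSlots Z m r) = (r, 0) := by
  have hkM : Z.length = m.toNat := by omega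
  unfold pvSlots
  rw [hkM]
  simp only [Nat.sub_self, Nat.zero_add, List.range_succ, List.range_zero, List.nil_append,
    List.map_cons, List.map_nil]
  have h1 : m.toNat + 1 = Z.length + 1 := by omega
  rw [h1, getD_q_last]
  have h0 : (pvQ Z ++ [r]).getD 0 0 = -1 := by simp [pvQ]
  rw [h0]
  unfold pvBfold pvStep
  simp only [List.foldl_cons, List.foldl_nil]
  split_ifs with h <;> simp [Prod.ext_iff] <;> omega

theorem pvAInner_noop (arr : List Int) (m : Int) (fuel : Nat) (left zc : Int) (h : zc ≤ m) :
    pvAInner arr m fuel left zc = (left, zc) := by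
  cases fuel with
  | zero => rfl
  | succ f => unfold pvAInner; rw [if_neg (by omega)]

theorem pvAInner_spec (arr : List Int) (m t : Int)
    (ht : PySem.List.pyGet? arr t = some 0) :
    ∀ (fuel : Nat) (left : Int), 0 ≤ left → left ≤ t →
    (∀ s : Int, left ≤ s → s < t → PySem.List.pyGet? arr s ≠ some 0) →
    (t - left).toNat < fuel →
    pvAInner arr m fuel left (m + 1) = (t + 1, m) := by
  have htlen : t < (arr.length : Int) := by
    by_contra hc
    have : PySem.List.pyGet? arr t = none := by
      rw [PySem.List.pyGet?_eq_none_iff]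
      intro hr
      rcases hr with ⟨_, h2⟩
      · omega
    rw [this] at ht; cases ht
  intro fuel
  induction fuel with
  | zero => intro left _ _ _ hf; omega
  | succ f ih =>
    intro left hl hlt hno hf
    unfold pvAInner
    rw [if_pos (by omega)]
    rcases Int.lt_or_le left t with hcase | hcase
    · have h2 : left < (arr.length : Int) := by omega
      have hgl : ∃ v, PySem.List.pyGet? arr left = some v :=
        ⟨_, PySem.List.pyGet?_eq_some_getElem arr hl h2⟩
      rcases hgl with ⟨v, hv⟩
      rw [hv]
      have hv0 : ¬ (v = 0) := by
        intro h0; subst h0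
        exact hno left le_rfl hcase hv
      show pvAInner arr m f (left + 1) (if v = 0 then m + 1 - 1 else m + 1) = (t + 1, m)
      rw [if_neg hv0]
      exact ih (left + 1) (by omega) (by omega) (fun s hs1 hs2 => hno s (by omega) hs2) (by omega)
    · have hleq : left = t := le_antisymm hlt hcase
      subst hleq
      rw [ht]
      show pvAInner arr m f (left + 1) (if (0:Int) = 0 then m + 1 - 1 else m + 1) = (left + 1, m)
      rw [if_pos rfl]
      have he : m + 1 - 1 = m := by ring
      rw [he]
      exact pvAInner_noop arr m f (left + 1) m le_rfl

theorem pvAlt_eq (n m : Int) (arr : List Int) (hm : 0 ≤ m)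
    (hk : m < ((pvZeros arr n).length : Int)) :
    longest_onely_sequence_alt n m arr =
      ((pvBfold (pvSlots (pvZeros arr n) m n)).2 + 1,
       (pvBfold (pvSlots (pvZeros arr n) m n)).2 + (pvBfold (pvSlots (pvZeros arr n) m n)).1) := by
  unfold longest_onely_sequence_alt
  rw [if_neg (by omega)]
  have hcnt : (((pvZeros arr n).length : Int) - m + 1 - 0).toNat
      = (pvZeros arr n).length - m.toNat + 1 := by omega
  have hfold : (PySem.List.pyRange 0 (((pvZeros arr n).length : Int) - m + 1) 1).foldl
      (fun best i =>
        let len := PySem.List.pyGetD (-1 :: pvZeros arr n ++ [n]) (i + m + 1) 0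
          - PySem.List.pyGetD (-1 :: pvZeros arr n ++ [n]) i 0 - 1
        if best.1 < len then (len, PySem.List.pyGetD (-1 :: pvZeros arr n ++ [n]) i 0 + 1) else best)
      ((0, 0) : Int × Int) = pvBfold (pvSlots (pvZeros arr n) m n) := by
    rw [PySem.List.pyRange_one, hcnt]
    unfold pvBfold pvSlots
    rw [List.foldl_map, List.foldl_map]
    apply PySem.List.foldl_congr_mem
    intro acc i hi
    rw [List.mem_range] at hi
    have hq : (-1 :: pvZeros arr n ++ [n]) = (pvQ (pvZeros arr n) ++ [n]) := by simp [pvQ]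
    have hM : m = (m.toNat : Int) := by omega
    have hidx : (i : Int) + m + 1 = ((i + m.toNat + 1 : Nat) : Int) := by
      push_cast [← hM]; ring
    have hidx0 : (0 : Int) + (i : Int) = ((i : Nat) : Int) := by push_cast; ring
    simp only [hq, hidx0, hidx, PySem.List.pyGetD_natCast]
    rfl
  simp only [hfold]

-- one unrolling of A's outer loop
theorem pvAOuter_step (arr : List Int) (n m : Int) (f : Nat) (r left zc ml mL v : Int)
    (hr : r < n) (hv : PySem.List.pyGet? arr r = some v) :
    pvAOuter arr n m (f + 1) r left zc ml mL =
      (let zc1 := if v = 0 then zc + 1 else zc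
       let s := pvAInner arr m (arr.length + 1) left zc1
       let best := if ml < r - s.1 + 1 then (r - s.1 + 1, s.1) else (ml, mL)
       pvAOuter arr n m f (r + 1) s.1 s.2 best.1 best.2) := by
  conv_lhs => unfold pvAOuter
  rw [if_pos hr, hv]

theorem pvAOuter_spec (arr : List Int) (n m : Int) (hm : 0 ≤ m) (hn : n ≤ (arr.length : Int)) :
    ∀ (fuel : Nat) (r left zc ml mL : Int), 0 ≤ r → r ≤ n → fuel = (n - r).toNat →
    pvInv arr m r left zc ml mL →
    pvAOuter arr n m fuel r left zc ml mL =
      (if ((pvZeros arr n).length : Int) ≤ m then ((1 : Int), n)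
       else ((pvBfold (pvSlots (pvZeros arr n) m n)).2 + 1,
             (pvBfold (pvSlots (pvZeros arr n) m n)).2 + (pvBfold (pvSlots (pvZeros arr n) m n)).1)) := by
  intro fuel
  induction fuel with
  | zero =>
    intro r left zc ml mL hr0 hrn hf hInv
    have hreq : r = n := by omega
    subst hreq
    obtain ⟨hl, hz, hbest⟩ := hInv
    show ((mL + 1 : Int), mL + ml) = _
    rcases hbest with ⟨hk, hml, hmL⟩ | ⟨hk, hpair⟩
    · rw [if_pos hk]
      rw [hml, hmL]; norm_num
    · rw [if_neg (by omega)]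
      rw [Prod.ext_iff] at hpair
      obtain ⟨h1, h2⟩ := hpair
      simp at h1 h2
      rw [h1, h2]
  | succ f ih =>
    intro r left zc ml mL hr0 hrn hf hInv
    have hrlt : r < n := by omega
    have hrlen : r < (arr.length : Int) := by omega
    have hget : PySem.List.pyGet? arr r = some (arr[r.toNat]'(by omega)) :=
      PySem.List.pyGet?_eq_some_getElem arr hr0 hrlen
    obtain ⟨hl, hz, hbest⟩ := hInv
    rw [pvAOuter_step arr n m f r left zc ml mL _ hrlt hget]
    simp only []
    set v := arr[r.toNat]'(by omega) with hvdef
    set Z := pvZeros arr r with hZdef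
    set k := Z.length with hkdef
    by_cases hv : v = 0
    · -- arr[r] == 0
      have hzsucc : pvZeros arr (r + 1) = Z ++ [r] := by
        rw [pvZeros_succ arr r hr0, if_pos (by rw [hget, hv])]
      by_cases hkm : (k : Int) + 1 ≤ m
      · -- still at most m zeros: left stays 0
        have hz1 : zc + 1 ≤ m := by
          rw [hz]; omega
        rw [if_pos hv, pvAInner_noop arr m _ left (zc + 1) hz1]
        rcases hbest with ⟨hk2, hml, hmL⟩ | ⟨hk2, _⟩
        · have hlz : left = 0 := by rw [hl]; exact pvLof_zero Z m (by omega)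
          rw [if_pos (by omega)]
          apply ih (r + 1) _ _ _ _ (by omega) (by omega) (by omega)
          refine ⟨?_, ?_, Or.inl ⟨?_, ?_, ?_⟩⟩
          · rw [hzsucc, pvLof_zero _ m (by simp; omega), hlz]
          · rw [hzsucc]; simp; omega
          · rw [hzsucc]; simp; omega
          · omega
          · omega
        · omega
      · -- at least m zeros already: the window slides
        have hkm' : m ≤ (k : Int) := by omega
        have hzm : zc = m := by rw [hz]; omega
        rw [if_pos hv, hzm]
        -- the first zero at position ≥ left is t = pvLof (Z ++ [r]) m - 1
        set Z' := Z ++ [r] with hZ'def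
        have hZ'zeros : pvZeros arr (r + 1) = Z' := hzsucc
        set t : Int := pvLof Z' m - 1 with htdef
        have hQ'len : (pvQ Z').length = k + 2 := by simp [pvQ, hZ'def]; omega
        have hMk : m.toNat ≤ k := by omega
        have hj1 : k + 1 - m.toNat < (pvQ Z').length := by omega
        have hZ'mem : ∀ z ∈ Z', 0 ≤ z ∧ z < r + 1 ∧ PySem.List.pyGet? arr z = some 0 := by
          intro z hzm2
          have : z ∈ pvZeros arr (r + 1) := by rw [hZ'zeros]; exact hzm2
          exact (mem_pvZeros arr (r + 1) z).mp this
        have hQ'sorted : (pvQ Z').Pairwise (· < ·) := by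
          rw [pvQ, List.pairwise_cons]
          constructor
          · intro z hzm2
            have := (hZ'mem z hzm2).1
            omega
          · rw [← hZ'zeros]; exact pvZeros_pairwise arr (r + 1)
        have hQ'le : ∀ (i j : Nat) (hi : i < (pvQ Z').length) (hj : j < (pvQ Z').length),
            i ≤ j → (pvQ Z')[i] ≤ (pvQ Z')[j] := by
          intro i j hi hj hij
          rcases Nat.lt_or_ge i j with h | h
          · exact le_of_lt (List.pairwise_iff_getElem.mp hQ'sorted i j hi hj h)
          · have : i = j := by omega
            subst this; rfl
        have hZ'lenval : Z'.length = k + 1 := by simp [hZ'def]; omega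
        have htval : t = (pvQ Z')[k + 1 - m.toNat] := by
          rw [htdef]
          unfold pvLof
          rw [hZ'lenval]
          have : k + 1 - m.toNat < (pvQ Z').length := hj1
          rw [List.getD_eq_getElem _ _ this]
          ring
        have hleftval : left - 1 = (pvQ Z')[k - m.toNat] := by
          have hq' : pvQ Z' = pvQ Z ++ [r] := by simp [pvQ, hZ'def]
          have hkk : k - m.toNat < (pvQ Z).length := by simp [pvQ]; omega
          have h5 : (pvQ Z')[k - m.toNat]'(by omega) = (pvQ Z).getD (k - m.toNat) 0 := by
            rw [List.getD_eq_getElem _ 0 hkk]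
            simp [hq', List.getElem_append, hkk]
          rw [h5, hl]
          unfold pvLof
          rw [← hkdef]
          ring
        have hlt : left ≤ t := by
          have := List.pairwise_iff_getElem.mp hQ'sorted (k - m.toNat) (k + 1 - m.toNat)
            (by omega) (by omega) (by omega)
          rw [← htval, ← hleftval] at this
          omega
        have htmem : t ∈ Z' := by
          have h0 : (pvQ Z')[0]'(by omega) = -1 := by simp [pvQ]
          have hgt : (pvQ Z')[0]'(by omega) < (pvQ Z')[k + 1 - m.toNat] := by
            exact List.pairwise_iff_getElem.mp hQ'sorted 0 (k + 1 - m.toNat) (by omega) (by omega) (by omega)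
          have hmem := List.getElem_mem hj1
          rw [← htval] at hmem
          rcases List.mem_cons.mp hmem with h | h
          · rw [h0] at hgt; rw [← htval] at hgt; omega
          · exact h
        have ht0 : PySem.List.pyGet? arr t = some 0 := (hZ'mem t htmem).2.2
        have htr : t < r + 1 := (hZ'mem t htmem).2.1
        have hleft0 : 0 ≤ left := by
          rw [hl]
          apply pvLof_nonneg
          intro z hzm2
          exact ((mem_pvZeros arr r z).mp hzm2).1
        have hno : ∀ s : Int, left ≤ s → s < t → PySem.List.pyGet? arr s ≠ some 0 := by
          intro s hs1 hs2 hs0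
          have hs3 : s ∈ pvZeros arr (r + 1) := by
            rw [mem_pvZeros]
            exact ⟨by omega, by omega, hs0⟩
          rw [hZ'zeros] at hs3
          obtain ⟨j, hj, hjv⟩ := List.mem_iff_getElem.mp hs3
          have hsq : s = (pvQ Z')[j + 1]'(by simp [pvQ]; omega) := by
            rw [← hjv]; simp [pvQ]
          have hlow : k - m.toNat < j + 1 := by
            by_contra hc
            have := hQ'le (j + 1) (k - m.toNat) (by simp [pvQ]; omega) (by omega) (by omega)
            rw [← hsq, ← hleftval] at this
            omega
          have hhigh : j + 1 < k + 1 - m.toNat := by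
            by_contra hc
            have := hQ'le (k + 1 - m.toNat) (j + 1) (by omega) (by simp [pvQ]; omega) (by omega)
            rw [← hsq, ← htval] at this
            omega
          omega
        have hinner : pvAInner arr m (arr.length + 1) left (m + 1) = (t + 1, m) := by
          apply pvAInner_spec arr m t ht0 (arr.length + 1) left hleft0 hlt hno
          omega
        rw [hinner]
        -- previous best is the fold over the old slots in both invariant branches
        have hprev : (ml, mL) = pvBfold (pvSlots Z m r) := by
          rcases hbest with ⟨hk2, hml, hmL⟩ | ⟨_, hpair⟩
          · have hkeq : (k : Int) = m := by omega
            rw [pvSlots_single Z m r hm hkeq hr0, hml, hmL]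
          · exact hpair
        have hsnoc := pvSlots_snoc Z m r (r + 1) hm hkm'
        rw [← hZ'def] at hsnoc
        have hlof' : pvLof Z' m = t + 1 := by rw [htdef]; ring
        apply ih (r + 1) _ _ _ _ (by omega) (by omega) (by omega)
        refine ⟨?_, ?_, Or.inr ⟨?_, ?_⟩⟩
        · simp only []
          rw [hZ'zeros, hlof']
        · simp only []
          rw [hZ'zeros, hZ'lenval]
          push_cast
          omega
        · rw [hZ'zeros, hZ'lenval]; push_cast; omega
        · simp only []
          rw [hZ'zeros, hsnoc, pvBfold_append, ← hprev, hlof']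
          rw [ite_pvStep]
          have : r - (t + 1) + 1 = r + 1 - (t + 1) := by ring
          rw [this]
    · -- arr[r] != 0 : zeros unchanged
      have hzsucc : pvZeros arr (r + 1) = Z := by
        rw [pvZeros_succ arr r hr0, if_neg (by rw [hget]; simp [hv])]
        simp [hZdef]
      have hz1 : zc ≤ m := by rw [hz]; omega
      rw [if_neg hv, pvAInner_noop arr m _ left zc hz1]
      rcases hbest with ⟨hk2, hml, hmL⟩ | ⟨hk2, hpair⟩
      · -- few zeros: whole prefix is the window
        have hlz : left = 0 := by rw [hl]; exact pvLof_zero Z m hk2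
        rw [if_pos (by omega)]
        apply ih (r + 1) _ _ _ _ (by omega) (by omega) (by omega)
        refine ⟨?_, ?_, Or.inl ⟨?_, ?_, ?_⟩⟩
        · rw [hzsucc, ← hl]
        · rw [hzsucc, ← hz]
        · rw [hzsucc]; exact hk2
        · omega
        · omega
      · -- window slides (or rather: last slot grows by one)
        have hdec := pvSlots_decomp Z m r hm hk2
        have hdec' := pvSlots_decomp Z m (r + 1) hm hk2
        apply ih (r + 1) _ _ _ _ (by omega) (by omega) (by omega)
        refine ⟨?_, ?_, Or.inr ⟨?_, ?_⟩⟩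
        · rw [hzsucc, ← hl]
        · rw [hzsucc, ← hz]
        · rw [hzsucc]; exact hk2
        · simp only []
          rw [Prod.mk.eta, ite_pvStep, hzsucc, hdec', pvBfold_append, hpair, hdec,
            pvBfold_append, hl]
          have e3 : r + 1 - pvLof Z m = r - pvLof Z m + 1 := by ring
          rw [e3]
          exact pvStep_bump _ _ _

-- ===== VERDICT (by name: the statement is the Claim_ definition above) =====
theorem longest_onely_sequence_spec : Claim_equal_longest_onely_sequence := by
  intro n m arr _ hpre
  obtain ⟨hm, hn⟩ := hpre
  unfold Spec_longest_onely_sequence longest_onely_sequence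
  rcases Int.lt_or_le n 0 with hneg | hpos
  · -- n < 0: the loop does not run, and B sees no zeros
    have h0 : n.toNat = 0 := by omega
    rw [h0]
    have hz : pvZeros arr n = [] := pvZeros_nonpos arr n (by omega)
    show ((0 : Int) + 1, (0 : Int) + 0) = _
    unfold longest_onely_sequence_alt
    rw [hz]
    rw [if_pos (by simp; omega)]
    have hmax : max n 0 = 0 := by omega
    rw [hmax]
    norm_num
  · -- 0 ≤ n: run the loop invariant from r = 0
    have hz0 : pvZeros arr 0 = [] := pvZeros_nonpos arr 0 le_rfl
    have base : pvInv arr m 0 0 0 0 0 := by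
      refine ⟨?_, ?_, Or.inl ⟨?_, rfl, rfl⟩⟩
      · rw [hz0, pvLof_zero _ m (by simp; omega)]
      · rw [hz0]; simp; omega
      · rw [hz0]; simp; omega
    have hmain := pvAOuter_spec arr n m hm hn n.toNat 0 0 0 0 0 le_rfl hpos (by omega) base
    rw [hmain]
    by_cases hk : ((pvZeros arr n).length : Int) ≤ m
    · rw [if_pos hk]
      unfold longest_onely_sequence_alt
      rw [if_pos hk]
      have hmax : max n 0 = n := by omega
      rw [hmax]
    · rw [if_neg hk, pvAlt_eq n m arr hm (by omega)]
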